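-- pv_equiv track=rewrite | github.com/euidong/BOJ | example/brute_force.py | subset_helper
-- ===== SOURCE A (Python) =====
-- def subset_helper(k, arr=[], prev=[]):
--     if len(prev) == k:
--         return []
--     ss = []
--     for idx in range(len(arr)):
--         ss.append(prev + [arr[idx]])
--         ss += subset_helper(k, arr[idx+1:], prev + [arr[idx]])
--     return ss
-- ===== SOURCE B (Python) =====
-- def subset_helper(k, arr=[], prev=[]):
--     out = []
--     stack = [(prev, arr)] if len(prev) != k else []
--     while stack:
--         p, rest = stack.pop()
--         if not rest:
--             continue
--         x, tail = rest[0], rest[1:]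
--         cur = p + [x]
--         out.append(cur)
--         stack.append((p, tail))
--         if len(cur) != k:
--             stack.append((cur, tail))
--     return out
-- ===== Notes on version B (the rewrite author's own statement) =====
-- stated objective: alternative
-- what changed: Replaces A's recursion (with list slicing at each call) by an explicit-stack pre-order DFS loop that maintains frames (prefix, remaining elements) and emits the identical output order.
import Mathlib
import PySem

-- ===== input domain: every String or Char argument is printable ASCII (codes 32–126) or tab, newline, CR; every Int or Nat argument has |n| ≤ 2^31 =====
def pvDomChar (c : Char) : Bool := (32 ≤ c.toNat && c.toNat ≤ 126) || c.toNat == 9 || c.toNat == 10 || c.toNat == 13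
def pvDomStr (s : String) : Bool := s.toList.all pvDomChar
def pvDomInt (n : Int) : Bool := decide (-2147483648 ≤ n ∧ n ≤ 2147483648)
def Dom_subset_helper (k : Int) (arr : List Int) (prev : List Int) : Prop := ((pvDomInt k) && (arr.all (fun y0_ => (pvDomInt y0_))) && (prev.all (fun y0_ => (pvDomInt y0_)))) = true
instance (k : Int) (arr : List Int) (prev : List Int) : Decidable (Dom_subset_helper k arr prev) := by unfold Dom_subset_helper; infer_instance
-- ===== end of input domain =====

-- B replaces A's recursive enumeration (slicing at each call) by an explicit-stack pre-order DFS
-- producing the identical output order (objective: alternative decomposition, no speed claim).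

-- ===== PORT A =====
mutual
def subset_helper (k : Int) (arr : List Int) (prev : List Int) : List (List Int) :=
  if (prev.length : Int) = k then [] else subsetLoop k arr prev
termination_by (arr.length, 1)

-- the 'for idx in range(len(arr))' loop of A; 'rest' is arr[idx+1:]
def subsetLoop (k : Int) (arr : List Int) (prev : List Int) : List (List Int) :=
  match arr with
  | [] => []
  | x :: rest => ((prev ++ [x]) :: subset_helper k rest (prev ++ [x])) ++ subsetLoop k rest prev
termination_by (arr.length, 0)
end


-- ===== PORT B =====
-- measure for the explicit-stack loop: each frame (p, rest) weighs 3^|rest|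
def altMu (stack : List (List Int × List Int)) : Nat :=
  (stack.map (fun f => 3 ^ f.2.length)).sum

-- the while loop of B: head of the list is the top of the Python stack
def altRun (k : Int) (stack : List (List Int × List Int)) (out : List (List Int)) : List (List Int) :=
  match stack with
  | [] => out
  | (_, []) :: stack' => altRun k stack' out
  | (p, x :: tail) :: stack' =>
      altRun k ((if ((p ++ [x]).length : Int) = k then [(p, tail)] else [(p ++ [x], tail), (p, tail)]) ++ stack') (out ++ [p ++ [x]])
termination_by altMu stack
decreasing_by
  · simp [altMu]
  · have h3 : 0 < 3 ^ tail.length := pow_pos (by norm_num) tail.length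
    split <;> (simp [altMu, pow_succ]; try omega)

def subset_helper_alt (k : Int) (arr : List Int) (prev : List Int) : List (List Int) :=
  altRun k (if (prev.length : Int) = k then [] else [(prev, arr)]) []


-- ===== PRECONDITION & SPEC =====
def Spec_subset_helper (k : Int) (arr : List Int) (prev : List Int) (out : List (List Int)) : Prop := out = subset_helper_alt k arr prev
instance (k : Int) (arr : List Int) (prev : List Int) (out : List (List Int)) : Decidable (Spec_subset_helper k arr prev out) := by unfold Spec_subset_helper; infer_instance

-- ===== CLAIM (what is proved, stated in full; the proofs are below) =====
def Claim_equal_subset_helper : Prop := ∀ (k : Int) (arr : List Int) (prev : List Int), Dom_subset_helper k arr prev → Spec_subset_helper k arr prev (subset_helper k arr prev)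

-- ===== LEMMAS AND PROOFS =====
-- invariant: when every frame's prefix has length ≠ k, the stack loop appends
-- exactly the A-loop output of each frame, top frame first
theorem altRun_eq (k : Int) (stack : List (List Int × List Int)) (out : List (List Int))
    (h : ∀ f ∈ stack, (f.1.length : Int) ≠ k) :
    altRun k stack out = out ++ (stack.map (fun f => subsetLoop k f.2 f.1)).flatten := by
  fun_induction altRun k stack out with
  | case1 => simp
  | case2 out p stack' ih =>
      rw [ih (fun f hf => h f (List.mem_cons_of_mem _ hf))]
      simp [subsetLoop]
  | case3 out p x tail stack' ih =>
      have hp : (p.length : Int) ≠ k := h (p, x :: tail) (List.mem_cons_self ..)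
      by_cases hc : ((p ++ [x]).length : Int) = k
      · have hinv : ∀ f ∈ (p, tail) :: stack', (f.1.length : Int) ≠ k := by
          intro f hf
          rcases List.mem_cons.1 hf with h1 | h1
          · subst h1; exact hp
          · exact h f (List.mem_cons_of_mem _ h1)
        rw [if_pos hc]
        rw [dif_pos hc] at ih
        rw [ih hinv]
        simp [subsetLoop, subset_helper]
        intro hh
        exact absurd (by simpa using hc) hh
      · have hinv : ∀ f ∈ (p ++ [x], tail) :: (p, tail) :: stack', (f.1.length : Int) ≠ k := by
          intro f hf
          rcases List.mem_cons.1 hf with h1 | h1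
          · subst h1; exact hc
          rcases List.mem_cons.1 h1 with h2 | h2
          · subst h2; exact hp
          · exact h f (List.mem_cons_of_mem _ h2)
        rw [if_neg hc]
        rw [dif_neg hc] at ih
        rw [ih hinv]
        simp [subsetLoop, subset_helper]
        intro hh
        exact absurd (by simpa using hh) (by simpa using hc)

-- ===== VERDICT (by name: the statement is the Claim_ definition above) =====
theorem subset_helper_spec : Claim_equal_subset_helper := by
  intro k arr prev _
  unfold Spec_subset_helper subset_helper subset_helper_alt
  by_cases h : (prev.length : Int) = k
  · simp [h, altRun]
  · rw [if_neg h, if_neg h, altRun_eq k _ _ (by simpa using h)]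
    simp
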